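-- pv_equiv track=rewrite | github.com/team-imagineer/ksatparser | ksatparser/problem_parser.py | extract_T
-- ===== SOURCE A (Python) =====
-- def extract_T(lines):
--     """
--     Args:
--         lines:
--         xmid: 원래 vertical line의 x값
--
--     Returns:(max length vertical line, max length horizontal line
--     """
--     xlen = []
--     ylen = []
--     maxx = 0
--     maxy = 0
--     for i, line in enumerate(lines):
--         x1,y1,x2,y2 = line[0]
--         xlen.append(abs(x2-x1))
--         ylen.append(abs(y2-y1))
--     xi = xlen.index(max(xlen))
--     yi = ylen.index(max(ylen))
--     return lines[yi][0], lines[xi][0]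
-- ===== SOURCE B (Python) =====
-- def extract_T(lines):
--     if not lines:
--         raise ValueError("extract_T: empty lines")
--     best_x = best_y = None
--     bxi = byi = 0
--     for i, line in enumerate(lines):
--         x1, y1, x2, y2 = line[0]
--         dx = abs(x2 - x1)
--         dy = abs(y2 - y1)
--         if best_x is None or best_x < dx:
--             best_x, bxi = dx, i
--         if best_y is None or best_y < dy:
--             best_y, byi = dy, i
--     return lines[byi][0], lines[bxi][0]
-- ===== Notes on version B (the rewrite author's own statement) =====
-- stated objective: simpler
-- what changed: Single pass tracking the best horizontal/vertical indices with strict-improvement updates, instead of materialising two length lists and re-scanning each with max() and list.index().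
import Mathlib
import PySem

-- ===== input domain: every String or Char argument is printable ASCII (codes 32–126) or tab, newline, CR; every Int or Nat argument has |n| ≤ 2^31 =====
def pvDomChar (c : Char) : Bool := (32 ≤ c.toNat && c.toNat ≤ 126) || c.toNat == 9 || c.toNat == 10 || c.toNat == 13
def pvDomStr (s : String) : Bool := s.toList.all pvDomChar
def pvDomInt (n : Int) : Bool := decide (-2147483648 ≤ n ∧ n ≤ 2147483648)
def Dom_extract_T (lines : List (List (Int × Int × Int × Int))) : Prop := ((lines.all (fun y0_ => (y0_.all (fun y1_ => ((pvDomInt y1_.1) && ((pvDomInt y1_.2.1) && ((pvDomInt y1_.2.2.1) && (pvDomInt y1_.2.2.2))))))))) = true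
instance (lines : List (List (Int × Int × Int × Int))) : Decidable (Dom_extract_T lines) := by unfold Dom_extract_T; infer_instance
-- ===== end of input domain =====

-- B changes the decomposition only: one pass tracking best indices instead of two length
-- lists re-scanned by max() and list.index(); same results wherever A returns.

-- ===== PORT A =====
-- literal port of A: build xlen/ylen by appending per line, then xi = xlen.index(max(xlen)),
-- yi = ylen.index(max(ylen)); line[0] is PySem.List.pyGetD (Pre_ keeps the index in range)
def extract_T (lines : List (List (Int × Int × Int × Int))) : (Int × Int × Int × Int) × (Int × Int × Int × Int) :=
  let acc := lines.foldl (fun (acc : List Int × List Int) line =>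
      let q := PySem.List.pyGetD line 0 ((0:Int),(0:Int),(0:Int),(0:Int))
      (acc.1 ++ [|q.2.2.1 - q.1|], acc.2 ++ [|q.2.2.2 - q.2.1|])) ([], [])
  let xlen := acc.1
  let ylen := acc.2
  let xi : Nat := (PySem.List.index? xlen ((PySem.List.max? xlen (fun v => v)).getD 0)).getD 0
  let yi : Nat := (PySem.List.index? ylen ((PySem.List.max? ylen (fun v => v)).getD 0)).getD 0
  (PySem.List.pyGetD (PySem.List.pyGetD lines (yi : Int) []) 0 ((0:Int),(0:Int),(0:Int),(0:Int)),
   PySem.List.pyGetD (PySem.List.pyGetD lines (xi : Int) []) 0 ((0:Int),(0:Int),(0:Int),(0:Int)))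

-- ===== PORT B =====
-- literal port of Source B: single enumerate pass; state = (best_x, bxi, best_y, byi, i)
def extract_T_alt (lines : List (List (Int × Int × Int × Int))) : (Int × Int × Int × Int) × (Int × Int × Int × Int) :=
  let st := lines.foldl
    (fun (s : Option Int × Nat × Option Int × Nat × Nat) line =>
      let q := PySem.List.pyGetD line 0 ((0:Int),(0:Int),(0:Int),(0:Int))
      let dx := |q.2.2.1 - q.1|
      let dy := |q.2.2.2 - q.2.1|
      let i := s.2.2.2.2
      let x' : Option Int × Nat :=
        match s.1 with
        | none => (some dx, i)
        | some b => if b < dx then (some dx, i) else (s.1, s.2.1)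
      let y' : Option Int × Nat :=
        match s.2.2.1 with
        | none => (some dy, i)
        | some b => if b < dy then (some dy, i) else (s.2.2.1, s.2.2.2.1)
      (x'.1, x'.2, y'.1, y'.2, i + 1))
    (none, 0, none, 0, 0)
  let bxi := st.2.1
  let byi := st.2.2.2.1
  (PySem.List.pyGetD (PySem.List.pyGetD lines (byi : Int) []) 0 ((0:Int),(0:Int),(0:Int),(0:Int)),
   PySem.List.pyGetD (PySem.List.pyGetD lines (bxi : Int) []) 0 ((0:Int),(0:Int),(0:Int),(0:Int)))

-- ===== PRECONDITION & SPEC =====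
-- Pre_ excludes exactly the inputs where A raises: an empty lines (max([]) is a ValueError)
-- and any line with no segment (line[0] is an IndexError).
def Pre_extract_T (lines : List (List (Int × Int × Int × Int))) : Prop :=
  lines ≠ [] ∧ ∀ l ∈ lines, l ≠ []
instance (lines : List (List (Int × Int × Int × Int))) : Decidable (Pre_extract_T lines) := by unfold Pre_extract_T; infer_instance
def pvWitness_extract_T : (List (List (Int × Int × Int × Int))) := [[(0, 0, 3, 1)], [(1, 1, 1, 5)]]
def Spec_extract_T (lines : List (List (Int × Int × Int × Int))) (out : (Int × Int × Int × Int) × (Int × Int × Int × Int)) : Prop := out = extract_T_alt lines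
instance (lines : List (List (Int × Int × Int × Int))) (out : (Int × Int × Int × Int) × (Int × Int × Int × Int)) : Decidable (Spec_extract_T lines out) := by unfold Spec_extract_T; infer_instance

-- ===== CLAIM (what is proved, stated in full; the proofs are below) =====
def Claim_equal_extract_T : Prop := ∀ (lines : List (List (Int × Int × Int × Int))), Dom_extract_T lines → Pre_extract_T lines → Spec_extract_T lines (extract_T lines)

-- ===== LEMMAS AND PROOFS =====

-- the per-line projections both ports apply to line[0]
def pvQ (l : List (Int × Int × Int × Int)) : Int × Int × Int × Int :=
  PySem.List.pyGetD l 0 ((0:Int),(0:Int),(0:Int),(0:Int))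
def pvDx (l : List (Int × Int × Int × Int)) : Int := |(pvQ l).2.2.1 - (pvQ l).1|
def pvDy (l : List (Int × Int × Int × Int)) : Int := |(pvQ l).2.2.2 - (pvQ l).2.1|

-- abstract first-argmax tracker (B's per-list state machine)
def pvStep (s : Option Int × Nat) (v : Int) (n : Nat) : Option Int × Nat :=
  match s.1 with
  | none => (some v, n)
  | some b => if b < v then (some v, n) else s

def pvRun (s : Option Int × Nat) (n : Nat) : List Int → Option Int × Nat
  | [] => s
  | v :: t => pvRun (pvStep s v n) (n + 1) t

lemma pvA_fold (lines : List (List (Int × Int × Int × Int))) (a b : List Int) :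
    lines.foldl (fun (acc : List Int × List Int) line =>
      let q := PySem.List.pyGetD line 0 ((0:Int),(0:Int),(0:Int),(0:Int))
      (acc.1 ++ [|q.2.2.1 - q.1|], acc.2 ++ [|q.2.2.2 - q.2.1|])) (a, b)
    = (a ++ lines.map pvDx, b ++ lines.map pvDy) := by
  induction lines generalizing a b with
  | nil => simp
  | cons l t ih => simp [List.foldl_cons, ih, pvDx, pvDy, pvQ]

lemma pvB_fold (lines : List (List (Int × Int × Int × Int))) (sx sy : Option Int × Nat) (n : Nat) :
    lines.foldl
      (fun (s : Option Int × Nat × Option Int × Nat × Nat) line =>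
        let q := PySem.List.pyGetD line 0 ((0:Int),(0:Int),(0:Int),(0:Int))
        let dx := |q.2.2.1 - q.1|
        let dy := |q.2.2.2 - q.2.1|
        let i := s.2.2.2.2
        let x' : Option Int × Nat :=
          match s.1 with
          | none => (some dx, i)
          | some b => if b < dx then (some dx, i) else (s.1, s.2.1)
        let y' : Option Int × Nat :=
          match s.2.2.1 with
          | none => (some dy, i)
          | some b => if b < dy then (some dy, i) else (s.2.2.1, s.2.2.2.1)
        (x'.1, x'.2, y'.1, y'.2, i + 1))
      (sx.1, sx.2, sy.1, sy.2, n)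
    = ((pvRun sx n (lines.map pvDx)).1, (pvRun sx n (lines.map pvDx)).2,
       (pvRun sy n (lines.map pvDy)).1, (pvRun sy n (lines.map pvDy)).2, n + lines.length) := by
  induction lines generalizing sx sy n with
  | nil => simp [pvRun]
  | cons l t ih =>
      simp only [List.foldl_cons, List.map_cons, pvRun]
      have := ih (pvStep sx (pvDx l) n) (pvStep sy (pvDy l) n) (n + 1)
      simp only [pvStep, pvDx, pvDy, pvQ] at this ⊢
      rw [show ∀ m, n + 1 + m = n + (m + 1) from fun m => by omega] at this
      cases hx : sx.1 <;> cases hy : sy.1 <;>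
        simp only [hx, hy] at this ⊢ <;>
        (try split_ifs at this ⊢) <;> simp_all

-- the tracker with a live best b (index bi, next position n) lands on bi if nothing in t
-- beats b, else on n + the first index of the max of t
lemma pvRun_some (t : List Int) (b : Int) (bi n : Nat) :
    (pvRun (some b, bi) n t).2 =
      if t.foldl max b ≤ b then bi
      else n + (PySem.List.index? t (t.foldl max b)).getD 0 := by
  induction t generalizing b bi n with
  | nil => simp [pvRun]
  | cons v t ih =>
      simp only [pvRun, pvStep, List.foldl_cons]
      by_cases hbv : b < v
      · rw [if_pos hbv, max_eq_right hbv.le, ih]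
        have hle := (PySem.List.le_foldl_max t v).1
        rw [if_neg (by omega : ¬ List.foldl max v t ≤ b)]
        by_cases hm : List.foldl max v t ≤ v
        · have hveq : List.foldl max v t = v := le_antisymm hm hle
          rw [if_pos hm, hveq, PySem.List.index?_cons_self]
          simp
        · push Not at hm
          rw [if_neg (by omega)]
          have hmem : List.foldl max v t ∈ t := by
            rcases PySem.List.foldl_max_mem t v with h | h
            · omega
            · exact h
          have hne : v ≠ List.foldl max v t := by omega
          rw [PySem.List.index?_cons_of_ne t hne]
          obtain ⟨k, hk⟩ := Option.isSome_iff_exists.mp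
            ((PySem.List.index?_isSome_iff _ _).mpr hmem)
          rw [hk]
          simp only [Option.map_some, Option.getD_some]
          omega
      · push Not at hbv
        rw [if_neg (by omega : ¬ b < v), max_eq_left hbv, ih]
        by_cases hm : List.foldl max b t ≤ b
        · rw [if_pos hm, if_pos hm]
        · push Not at hm
          rw [if_neg (by omega), if_neg (by omega)]
          have hmem : List.foldl max b t ∈ t := by
            rcases PySem.List.foldl_max_mem t b with h | h
            · omega
            · exact h
          have hne : v ≠ List.foldl max b t := by omega
          rw [PySem.List.index?_cons_of_ne t hne]
          obtain ⟨k, hk⟩ := Option.isSome_iff_exists.mp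
            ((PySem.List.index?_isSome_iff _ _).mpr hmem)
          rw [hk]
          simp only [Option.map_some, Option.getD_some]
          omega

-- on a nonempty list, B's tracker index equals A's xs.index(max(xs))
lemma pvRun_eq_index_max (v : Int) (t : List Int) :
    (pvRun (none, 0) 0 (v :: t)).2
      = (PySem.List.index? (v :: t)
          ((PySem.List.max? (v :: t) (fun x => x)).getD 0)).getD 0 := by
  simp only [pvRun, pvStep]
  rw [pvRun_some, PySem.List.max?_id_cons]
  by_cases hm : t.foldl max v ≤ v
  · have hveq : t.foldl max v = v := le_antisymm hm (PySem.List.le_foldl_max t v).1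
    simp [hveq, List.idxOf?_cons]
  · push Not at hm
    rw [if_neg (by omega)]
    have hmem : t.foldl max v ∈ t := by
      rcases PySem.List.foldl_max_mem t v with h | h
      · omega
      · exact h
    have hne : v ≠ t.foldl max v := by omega
    simp only [Option.getD_some]
    rw [PySem.List.index?_cons_of_ne t hne]
    obtain ⟨k, hk⟩ := Option.isSome_iff_exists.mp
      ((PySem.List.index?_isSome_iff _ _).mpr hmem)
    rw [hk]
    simp only [Option.map_some, Option.getD_some]
    omega

-- ===== VERDICT (by name: the statement is the Claim_ definition above) =====
theorem extract_T_spec : Claim_equal_extract_T := by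
  intro lines _ hpre
  obtain ⟨hne, -⟩ := hpre
  unfold Spec_extract_T extract_T extract_T_alt
  simp only
  rw [pvA_fold]
  have hB := pvB_fold lines (none, 0) (none, 0) 0
  simp only at hB
  rw [hB]
  simp only [List.nil_append]
  cases lines with
  | nil => exact absurd rfl hne
  | cons l t =>
      rw [List.map_cons, List.map_cons, pvRun_eq_index_max, pvRun_eq_index_max]
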